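-- pv_equiv track=rewrite | github.com/Manny27nyc/Commander | keepercommander/importer/importer.py | import_phone_field
-- ===== SOURCE A (Python) =====
-- def import_phone_field(value):   # type: (str) -> Optional[dict]
--     if isinstance(value, str):
--         region = ''
--         number = ''
--         ext = ''
--         phone_type, _, rest = value.partition(':')
--         if not rest:
--             rest = phone_type
--             phone_type = ''
--         comps = rest.strip().split(' ')
--         for comp in comps:
--             comp = comp.strip()
--             if comp.isalpha():
--                 if len(comp) == 2:
--                     if not region:
--                         region = comp
--                 elif not phone_type:
--                     phone_type = comp
--             elif len(comp) >= 6: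
--                 if not number:
--                     number = comp
--             elif not ext:
--                 ext = comp
--         result = {
--             'number': number.strip(),
--             'ext': ext.strip()
--         }
--         phone_type = phone_type.strip()
--         region = region.strip()
--         if phone_type:
--             result['type'] = phone_type
--         if region:
--             result['region'] = region
--         return result
-- ===== SOURCE B (Python) =====
-- def import_phone_field(value):   # type: (str) -> Optional[dict]
--     if not isinstance(value, str):
--         return None
--     phone_type, _, rest = value.partition(':')
--     if not rest:
--         rest, phone_type = phone_type, ''
--     comps = [c.strip() for c in rest.strip().split(' ')]
--     region = next((c for c in comps if c.isalpha() and len(c) == 2), '')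
--     if not phone_type:
--         phone_type = next((c for c in comps if c.isalpha() and len(c) != 2), '')
--     number = next((c for c in comps if not c.isalpha() and len(c) >= 6), '')
--     ext = next((c for c in comps if c and not c.isalpha() and len(c) < 6), '')
--     result = {'number': number, 'ext': ext}
--     phone_type = phone_type.strip()
--     if phone_type:
--         result['type'] = phone_type
--     if region:
--         result['region'] = region
--     return result
-- ===== Notes on version B (the rewrite author's own statement) =====
-- stated objective: simpler
-- what changed: A's single accumulating loop over the tokens (four mutable first-match slots updated through ordered branches) is replaced by four independent first-match selections (next(...) over the pre-stripped token list), one per output field, with the partition-seeded type used only when present.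
import Mathlib
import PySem

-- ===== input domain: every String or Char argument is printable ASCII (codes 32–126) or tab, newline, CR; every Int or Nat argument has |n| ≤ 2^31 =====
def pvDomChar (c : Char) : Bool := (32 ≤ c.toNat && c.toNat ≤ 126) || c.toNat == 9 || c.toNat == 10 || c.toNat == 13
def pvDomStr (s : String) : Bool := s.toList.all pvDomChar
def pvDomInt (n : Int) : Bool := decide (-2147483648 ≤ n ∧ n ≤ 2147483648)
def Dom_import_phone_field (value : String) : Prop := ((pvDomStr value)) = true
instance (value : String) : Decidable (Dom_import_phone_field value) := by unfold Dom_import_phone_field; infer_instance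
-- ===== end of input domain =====

-- B replaces A's single accumulating loop by four independent first-match selections over the
-- pre-stripped tokens (objective: simpler decomposition, same cost).

-- ===== PORT A =====
-- value.partition(':') restricted to the one-char separator ':' (exact: first occurrence splits;
-- `none` in the second component means the separator was not found, i.e. Python's ('', '') tail).
def pvPartitionColon : List Char → List Char × Option (List Char)
  | [] => ([], none)
  | c :: cs =>
    if c = ':' then ([], some cs)
    else ((c :: (pvPartitionColon cs).1), (pvPartitionColon cs).2)

-- the for-loop of A over comps, carrying (region, number, ext, phone_type)
def pvLoopA : List (List Char) → List Char → List Char → List Char → List Char →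
    List Char × List Char × List Char × List Char
  | [], region, number, ext, ptype => (region, number, ext, ptype)
  | comp :: cs, region, number, ext, ptype =>
    let c := PySem.Chars.strip comp
    if PySem.Chars.strIsalpha c then
      if c.length = 2 then
        pvLoopA cs (if region = [] then c else region) number ext ptype
      else
        pvLoopA cs region number ext (if ptype = [] then c else ptype)
    else if 6 ≤ c.length then
      pvLoopA cs region (if number = [] then c else number) ext ptype
    else
      pvLoopA cs region number (if ext = [] then c else ext) ptype

def import_phone_field (value : String) : Option (List (String × String)) :=
  let pr := pvPartitionColon value.toList
  let ptype0 := pr.1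
  let rest0 := pr.2.getD []
  let ptype1 := if rest0 = [] then [] else ptype0
  let rest1 := if rest0 = [] then ptype0 else rest0
  let comps := PySem.Chars.splitOn (PySem.Chars.strip rest1) [' ']
  let st := pvLoopA comps [] [] [] ptype1
  let number := PySem.Chars.strip st.2.1
  let ext := PySem.Chars.strip st.2.2.1
  let ptype := PySem.Chars.strip st.2.2.2
  let region := PySem.Chars.strip st.1
  some (([("number", String.ofList number), ("ext", String.ofList ext)] ++
         (if ptype ≠ [] then [("type", String.ofList ptype)] else [])) ++
        (if region ≠ [] then [("region", String.ofList region)] else []))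

-- ===== PORT B =====
-- the four token predicates of Source B's generator expressions
def pvIsRegion (c : List Char) : Bool := PySem.Chars.strIsalpha c && c.length == 2
def pvIsType (c : List Char) : Bool := PySem.Chars.strIsalpha c && !(c.length == 2)
def pvIsNumber (c : List Char) : Bool := !PySem.Chars.strIsalpha c && decide (6 ≤ c.length)
def pvIsExt (c : List Char) : Bool := !c.isEmpty && !PySem.Chars.strIsalpha c && decide (c.length < 6)

-- next((c for c in comps if p c), '')
def pvFirst (p : List Char → Bool) (comps : List (List Char)) : List Char :=
  (comps.find? p).getD []

def import_phone_field_alt (value : String) : Option (List (String × String)) :=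
  let pr := pvPartitionColon value.toList
  let ptype0 := pr.1
  let rest0 := pr.2.getD []
  let ptype1 := if rest0 = [] then [] else ptype0
  let rest := if rest0 = [] then ptype0 else rest0
  let comps := (PySem.Chars.splitOn (PySem.Chars.strip rest) [' ']).map PySem.Chars.strip
  let region := pvFirst pvIsRegion comps
  let ptype2 := if ptype1 = [] then pvFirst pvIsType comps else ptype1
  let number := pvFirst pvIsNumber comps
  let ext := pvFirst pvIsExt comps
  let ptype := PySem.Chars.strip ptype2
  some (([("number", String.ofList number), ("ext", String.ofList ext)] ++
         (if ptype ≠ [] then [("type", String.ofList ptype)] else [])) ++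
        (if region ≠ [] then [("region", String.ofList region)] else []))

-- ===== PRECONDITION & SPEC =====
def Spec_import_phone_field (value : String) (out : Option (List (String × String))) : Prop := out = import_phone_field_alt value
instance (value : String) (out : Option (List (String × String))) : Decidable (Spec_import_phone_field value out) := by unfold Spec_import_phone_field; infer_instance

-- ===== CLAIM (what is proved, stated in full; the proofs are below) =====
def Claim_equal_import_phone_field : Prop := ∀ (value : String), Dom_import_phone_field value → Spec_import_phone_field value (import_phone_field value)

-- ===== LEMMAS AND PROOFS =====

lemma pv_lstrip_idem (s : List Char) :
    PySem.Chars.lstrip (PySem.Chars.lstrip s) = PySem.Chars.lstrip s := by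
  unfold PySem.Chars.lstrip
  induction s with
  | nil => rfl
  | cons c cs ih =>
    rw [List.dropWhile_cons]
    split
    · exact ih
    · next h => rw [List.dropWhile_cons, if_neg h]

lemma pv_rstrip_idem (s : List Char) :
    PySem.Chars.rstrip (PySem.Chars.rstrip s) = PySem.Chars.rstrip s := by
  unfold PySem.Chars.rstrip
  rw [List.reverse_reverse]
  have := pv_lstrip_idem s.reverse
  unfold PySem.Chars.lstrip at this
  rw [this]

lemma pv_lstrip_rstrip_of_lstripped (t : List Char) (h : PySem.Chars.lstrip t = t) :
    PySem.Chars.lstrip (PySem.Chars.rstrip t) = PySem.Chars.rstrip t := by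
  obtain ⟨w, hw⟩ := List.dropWhile_suffix (p := PySem.Chars.isspace) (l := t.reverse)
  have ht : t = PySem.Chars.rstrip t ++ w.reverse := by
    unfold PySem.Chars.rstrip
    calc t = (t.reverse).reverse := (List.reverse_reverse t).symm
      _ = (w ++ List.dropWhile PySem.Chars.isspace t.reverse).reverse := by rw [hw]
      _ = _ := by rw [List.reverse_append]
  cases hr : PySem.Chars.rstrip t with
  | nil => rfl
  | cons a l =>
    have hns : PySem.Chars.isspace a = false := by
      by_contra hsp
      simp only [Bool.not_eq_false] at hsp
      rw [ht, hr] at h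
      simp only [List.cons_append, PySem.Chars.lstrip, List.dropWhile_cons, hsp, if_true] at h
      have hle := (List.dropWhile_sublist (p := PySem.Chars.isspace)
        (l := l ++ w.reverse)).length_le
      have := congrArg List.length h
      rw [List.length_cons] at this
      omega
    simp [PySem.Chars.lstrip, hns]

lemma pv_strip_idem (s : List Char) :
    PySem.Chars.strip (PySem.Chars.strip s) = PySem.Chars.strip s := by
  show PySem.Chars.rstrip (PySem.Chars.lstrip (PySem.Chars.rstrip (PySem.Chars.lstrip s))) = _
  rw [pv_lstrip_rstrip_of_lstripped _ (pv_lstrip_idem s), pv_rstrip_idem]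
  rfl

-- first-match accumulator bridge used to relate A's loop to B's selections
def pvPick (x : List Char) (o : Option (List Char)) : List Char :=
  if x = [] then o.getD [] else x

lemma pvPick_none (x : List Char) : pvPick x none = x := by
  unfold pvPick; split <;> simp_all

lemma pvPick_hit (r c : List Char) (hc : c ≠ []) (o : Option (List Char)) :
    pvPick (if r = [] then c else r) o = pvPick r (some c) := by
  unfold pvPick; by_cases hr : r = [] <;> simp [hr, hc]

lemma pv_alpha_ne_nil {c : List Char} (h : PySem.Chars.strIsalpha c = true) : c ≠ [] := by
  intro hc; subst hc; exact absurd h (by decide)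

lemma pv_loopA_find (cs : List (List Char)) : ∀ r n e t,
    pvLoopA cs r n e t =
      (pvPick r ((cs.map PySem.Chars.strip).find? pvIsRegion),
       pvPick n ((cs.map PySem.Chars.strip).find? pvIsNumber),
       pvPick e ((cs.map PySem.Chars.strip).find? pvIsExt),
       pvPick t ((cs.map PySem.Chars.strip).find? pvIsType)) := by
  induction cs with
  | nil =>
    intro r n e t
    simp only [List.map_nil, List.find?_nil, pvPick_none]
    rfl
  | cons comp cs ih =>
    intro r n e t
    rw [List.map_cons]
    set c := PySem.Chars.strip comp with hc
    by_cases hA : PySem.Chars.strIsalpha c = true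
    · have hne := pv_alpha_ne_nil hA
      by_cases h2 : c.length = 2
      · rw [List.find?_cons_of_pos (by simp [pvIsRegion, hA, h2]),
            List.find?_cons_of_neg (by simp [pvIsNumber, hA]),
            List.find?_cons_of_neg (by simp [pvIsExt, hA]),
            List.find?_cons_of_neg (by simp [pvIsType, hA, h2])]
        have hstep : pvLoopA (comp :: cs) r n e t =
            pvLoopA cs (if r = [] then c else r) n e t := by
          simp only [pvLoopA, ← hc, hA, h2, if_true]
        rw [hstep, ih, pvPick_hit r c hne]
      · rw [List.find?_cons_of_neg (by simp [pvIsRegion, h2]),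
            List.find?_cons_of_neg (by simp [pvIsNumber, hA]),
            List.find?_cons_of_neg (by simp [pvIsExt, hA]),
            List.find?_cons_of_pos (by simp [pvIsType, hA, h2])]
        have hstep : pvLoopA (comp :: cs) r n e t =
            pvLoopA cs r n e (if t = [] then c else t) := by
          simp only [pvLoopA, ← hc, hA, h2, if_true, if_false]
        rw [hstep, ih, pvPick_hit t c hne]
    · by_cases h6 : 6 ≤ c.length
      · have hne : c ≠ [] := by intro hcc; rw [hcc] at h6; simp at h6
        rw [List.find?_cons_of_neg (by simp [pvIsRegion, hA]),
            List.find?_cons_of_pos (by simp [pvIsNumber, hA, h6]),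
            List.find?_cons_of_neg (by simp [pvIsExt]; omega),
            List.find?_cons_of_neg (by simp [pvIsType, hA])]
        have hstep : pvLoopA (comp :: cs) r n e t =
            pvLoopA cs r (if n = [] then c else n) e t := by
          simp only [pvLoopA, ← hc]
          rw [if_neg hA, if_pos h6]
        rw [hstep, ih, pvPick_hit n c hne]
      · have hstep : pvLoopA (comp :: cs) r n e t =
            pvLoopA cs r n (if e = [] then c else e) t := by
          simp only [pvLoopA, ← hc]
          rw [if_neg hA, if_neg h6]
        by_cases hnil : c = []
        · rw [List.find?_cons_of_neg (by simp [pvIsRegion, hA]),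
              List.find?_cons_of_neg (by simp [pvIsNumber, h6]),
              List.find?_cons_of_neg (by simp [pvIsExt, hnil]),
              List.find?_cons_of_neg (by simp [pvIsType, hA])]
          have he : (if e = [] then c else e) = e := by
            rw [hnil]; split <;> simp_all
          rw [hstep, he, ih]
        · rw [List.find?_cons_of_neg (by simp [pvIsRegion, hA]),
              List.find?_cons_of_neg (by simp [pvIsNumber, h6]),
              List.find?_cons_of_pos (by
                simp [pvIsExt, hA, hnil]; omega),
              List.find?_cons_of_neg (by simp [pvIsType, hA])]
          rw [hstep, ih, pvPick_hit e c hnil]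

-- any first match over the stripped tokens is already stripped
lemma pv_strip_firstD (p : List Char → Bool) (l : List (List Char)) :
    PySem.Chars.strip (((l.map PySem.Chars.strip).find? p).getD []) =
      ((l.map PySem.Chars.strip).find? p).getD [] := by
  cases h : (l.map PySem.Chars.strip).find? p with
  | none => rfl
  | some x =>
    have hx := List.mem_of_find?_eq_some h
    rcases List.mem_map.1 hx with ⟨y, _, hy⟩
    rw [Option.getD_some, ← hy, pv_strip_idem]

-- ===== VERDICT (by name: the statement is the Claim_ definition above) =====
theorem import_phone_field_spec : Claim_equal_import_phone_field := by
  intro value _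
  show import_phone_field value = import_phone_field_alt value
  unfold import_phone_field import_phone_field_alt
  simp only [pv_loopA_find, pvFirst, pvPick, reduceIte]
  rw [pv_strip_firstD, pv_strip_firstD, pv_strip_firstD]
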